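-- pv_equiv track=rewrite | github.com/njsaugat/playHard | evaluate_model.py | categorize_text
-- ===== SOURCE A (Python) =====
-- def categorize_text(text: str) -> str:
--     """Categorize text for stratified analysis"""
--     text_lower = text.lower()
--
--     # High confidence ad patterns
--     if any(p in text_lower for p in ['sponsored by', 'brought to you', 'word from our sponsor']):
--         return 'explicit_ad'
--
--     # Promo code mentions
--     if any(p in text_lower for p in ['promo code', 'use code', 'discount code', 'coupon']):
--         return 'has_promo_code'
--
--     # URL mentions
--     if '.com' in text_lower or '.io' in text_lower or '.co/' in text_lower:
--         return 'has_url'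
--
--     # Patreon/Substack
--     if any(p in text_lower for p in ['patreon', 'substack', 'ko-fi', 'buy me a coffee']):
--         return 'patreon_substack'
--
--     # Social media
--     if any(p in text_lower for p in ['follow us', 'subscribe', 'twitter', 'instagram', 'youtube']):
--         return 'social_media'
--
--     # Brand love
--     if any(p in text_lower for p in ['i love', 'i really like', 'big fan of', 'shoutout', 'not sponsored']):
--         return 'brand_love'
--
--     return 'other'
-- ===== SOURCE B (Python) =====
-- # B: a single left-to-right sliding-window scan: at every position of the lowered text,
-- # check which patterns start there (startswith), keeping the best (lowest) priority seen;
-- # no substring 'in' searches, one pass over the text.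
-- _PRIORITY = {
--     'sponsored by': 0, 'brought to you': 0, 'word from our sponsor': 0,
--     'promo code': 1, 'use code': 1, 'discount code': 1, 'coupon': 1,
--     '.com': 2, '.io': 2, '.co/': 2,
--     'patreon': 3, 'substack': 3, 'ko-fi': 3, 'buy me a coffee': 3,
--     'follow us': 4, 'subscribe': 4, 'twitter': 4, 'instagram': 4, 'youtube': 4,
--     'i love': 5, 'i really like': 5, 'big fan of': 5, 'shoutout': 5, 'not sponsored': 5,
-- }
-- _LABELS = ['explicit_ad', 'has_promo_code', 'has_url',
--            'patreon_substack', 'social_media', 'brand_love', 'other']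
--
-- def categorize_text(text: str) -> str:
--     t = text.lower()
--     best = 6
--     for i in range(len(t)):
--         for p, r in _PRIORITY.items():
--             if r < best and t.startswith(p, i):
--                 best = r
--     return _LABELS[best]
-- ===== Notes on version B (the rewrite author's own statement) =====
-- stated objective: alternative
-- what changed: Replaced the six ordered branches of whole-text substring searches by a single left-to-right sliding-window scan that, at each position of the lowered text, checks which patterns start there via startswith and keeps the lowest priority seen, indexing a label list at the end.
import Mathlib
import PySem

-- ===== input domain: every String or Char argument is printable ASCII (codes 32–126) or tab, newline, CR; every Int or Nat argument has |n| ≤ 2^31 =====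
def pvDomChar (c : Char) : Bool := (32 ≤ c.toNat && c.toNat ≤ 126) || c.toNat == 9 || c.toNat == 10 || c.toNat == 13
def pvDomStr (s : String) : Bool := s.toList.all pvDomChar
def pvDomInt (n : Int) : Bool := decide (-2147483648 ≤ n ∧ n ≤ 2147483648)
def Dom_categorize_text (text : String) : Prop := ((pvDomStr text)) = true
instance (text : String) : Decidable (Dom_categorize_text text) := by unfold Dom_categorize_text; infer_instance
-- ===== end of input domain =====

-- B replaces A's six ordered substring-search branches by a single sliding-window scan of
-- the lowered text, keeping the best (lowest) priority of any pattern starting at each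
-- position (objective: alternative — no substring searches, one left-to-right pass).

-- ===== PORT A =====
def categorize_text (text : String) : String :=
  let text_lower := PySem.Str.lower text
  if ["sponsored by", "brought to you", "word from our sponsor"].any
      (fun p => PySem.Str.isIn p text_lower) then "explicit_ad"
  else if ["promo code", "use code", "discount code", "coupon"].any
      (fun p => PySem.Str.isIn p text_lower) then "has_promo_code"
  else if PySem.Str.isIn ".com" text_lower || PySem.Str.isIn ".io" text_lower
      || PySem.Str.isIn ".co/" text_lower then "has_url"
  else if ["patreon", "substack", "ko-fi", "buy me a coffee"].any
      (fun p => PySem.Str.isIn p text_lower) then "patreon_substack"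
  else if ["follow us", "subscribe", "twitter", "instagram", "youtube"].any
      (fun p => PySem.Str.isIn p text_lower) then "social_media"
  else if ["i love", "i really like", "big fan of", "shoutout", "not sponsored"].any
      (fun p => PySem.Str.isIn p text_lower) then "brand_love"
  else "other"

-- ===== PORT B =====
-- _PRIORITY : pattern → priority, in Source B's insertion order
def prioTable : List (List Char × Nat) :=
  [("sponsored by".toList, 0), ("brought to you".toList, 0), ("word from our sponsor".toList, 0),
   ("promo code".toList, 1), ("use code".toList, 1), ("discount code".toList, 1), ("coupon".toList, 1),
   (".com".toList, 2), (".io".toList, 2), (".co/".toList, 2),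
   ("patreon".toList, 3), ("substack".toList, 3), ("ko-fi".toList, 3), ("buy me a coffee".toList, 3),
   ("follow us".toList, 4), ("subscribe".toList, 4), ("twitter".toList, 4), ("instagram".toList, 4), ("youtube".toList, 4),
   ("i love".toList, 5), ("i really like".toList, 5), ("big fan of".toList, 5), ("shoutout".toList, 5), ("not sponsored".toList, 5)]

def labelsB : List String :=
  ["explicit_ad", "has_promo_code", "has_url", "patreon_substack", "social_media", "brand_love", "other"]

-- inner loop: 'for p, r in _PRIORITY.items(): if r < best and t.startswith(p, i): best = r'
-- (t.startswith(p, i) is PySem.Chars.startswith on the suffix of t starting at i — exact)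
def stepTable (s : List Char) (best : Nat) : Nat :=
  prioTable.foldl (fun b pr => if pr.2 < b ∧ PySem.Chars.startswith s pr.1 = true then pr.2 else b) best

-- outer loop 'for i in range(len(t))': recursion over the successive suffixes of t
def scanPos : List Char → Nat → Nat
  | [], best => best
  | c :: rest, best => scanPos rest (stepTable (c :: rest) best)

def categorize_text_alt (text : String) : String :=
  labelsB.getD (scanPos (PySem.Str.lower text).toList 6) "other"

-- ===== PRECONDITION & SPEC =====
def Spec_categorize_text (text : String) (out : String) : Prop := out = categorize_text_alt text
instance (text : String) (out : String) : Decidable (Spec_categorize_text text out) := by unfold Spec_categorize_text; infer_instance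

-- ===== CLAIM (what is proved, stated in full; the proofs are below) =====
def Claim_equal_categorize_text : Prop := ∀ (text : String), Dom_categorize_text text → Spec_categorize_text text (categorize_text text)

-- ===== LEMMAS AND PROOFS =====

-- the inner fold computes "min of best and every priority whose pattern starts here"
theorem foldl_step_le_iff (tbl : List (List Char × Nat)) (s : List Char) (b j : Nat) :
    tbl.foldl (fun b pr => if pr.2 < b ∧ PySem.Chars.startswith s pr.1 = true then pr.2 else b) b ≤ j
      ↔ b ≤ j ∨ ∃ pr ∈ tbl, pr.2 ≤ j ∧ pr.1 <+: s := by
  induction tbl generalizing b with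
  | nil => simp
  | cons hd tl ih =>
      simp only [List.foldl_cons, List.mem_cons]
      by_cases hc : hd.2 < b ∧ PySem.Chars.startswith s hd.1 = true
      · rw [if_pos hc, ih]
        obtain ⟨hlt, hpre⟩ := hc
        rw [PySem.Chars.startswith_iff] at hpre
        constructor
        · rintro (h | ⟨pr, hmem, hj, hp⟩)
          · exact Or.inr ⟨hd, Or.inl rfl, h, hpre⟩
          · exact Or.inr ⟨pr, Or.inr hmem, hj, hp⟩
        · rintro (h | ⟨pr, rfl | hmem, hj, hp⟩)
          · exact Or.inl (le_trans hlt.le h)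
          · exact Or.inl hj
          · exact Or.inr ⟨pr, hmem, hj, hp⟩
      · rw [if_neg hc, ih]
        constructor
        · rintro (h | ⟨pr, hmem, hj, hp⟩)
          · exact Or.inl h
          · exact Or.inr ⟨pr, Or.inr hmem, hj, hp⟩
        · rintro (h | ⟨pr, rfl | hmem, hj, hp⟩)
          · exact Or.inl h
          · rcases Nat.lt_or_ge pr.2 b with hlt | hge
            · exact absurd ⟨hlt, (PySem.Chars.startswith_iff _ _).mpr hp⟩ hc
            · exact Or.inl (le_trans hge hj)
          · exact Or.inr ⟨pr, hmem, hj, hp⟩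

theorem prioTable_ne_nil : ∀ pr ∈ prioTable, pr.1 ≠ [] := by decide

-- the whole scan computes "min of best and every priority whose pattern occurs in the text"
theorem scanPos_le_iff (cs : List Char) (b j : Nat) :
    scanPos cs b ≤ j ↔ b ≤ j ∨ ∃ pr ∈ prioTable, pr.2 ≤ j ∧ pr.1 <:+: cs := by
  induction cs generalizing b with
  | nil =>
      simp only [scanPos]
      constructor
      · exact Or.inl
      · rintro (h | ⟨pr, hmem, _, hinf⟩)
        · exact h
        · exact absurd (List.eq_nil_of_infix_nil hinf) (prioTable_ne_nil pr hmem)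
  | cons c rest ih =>
      simp only [scanPos, ih, stepTable, foldl_step_le_iff]
      constructor
      · rintro ((h | ⟨pr, hmem, hj, hp⟩) | ⟨pr, hmem, hj, hinf⟩)
        · exact Or.inl h
        · exact Or.inr ⟨pr, hmem, hj, List.infix_cons_iff.mpr (Or.inl hp)⟩
        · exact Or.inr ⟨pr, hmem, hj, List.infix_cons_iff.mpr (Or.inr hinf)⟩
      · rintro (h | ⟨pr, hmem, hj, hinf⟩)
        · exact Or.inl (Or.inl h)
        · rcases List.infix_cons_iff.mp hinf with hp | hinf'
          · exact Or.inl (Or.inr ⟨pr, hmem, hj, hp⟩)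
          · exact Or.inr ⟨pr, hmem, hj, hinf'⟩

-- ===== VERDICT (by name: the statement is the Claim_ definition above) =====
set_option maxHeartbeats 1600000 in
theorem categorize_text_spec : Claim_equal_categorize_text := by
  intro text _
  unfold Spec_categorize_text categorize_text categorize_text_alt
  set L := (PySem.Str.lower text).toList with hL
  set m := scanPos L 6 with hm
  have hm6 : m ≤ 6 := (scanPos_le_iff L 6 6).mpr (Or.inl le_rfl)
  have h : ∀ j : Nat, j ≤ 5 → (m ≤ j ↔ ∃ pr ∈ prioTable, pr.2 ≤ j ∧ pr.1 <:+: L) := by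
    intro j hj
    rw [hm, scanPos_le_iff]
    have h6 : ¬ (6 ≤ j) := by omega
    simp [h6]
  have h0 := h 0 (by omega)
  have h1 := h 1 (by omega)
  have h2 := h 2 (by omega)
  have h3 := h 3 (by omega)
  have h4 := h 4 (by omega)
  have h5 := h 5 (by omega)
  simp only [prioTable, List.mem_cons, List.not_mem_nil, or_false, exists_eq_or_imp,
    exists_eq_left] at h0 h1 h2 h3 h4 h5
  norm_num at h0 h1 h2 h3 h4 h5
  simp only [List.any_cons, List.any_nil, Bool.or_false, Bool.or_eq_true,
    PySem.Str.isIn_iff_infix, ← hL]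
  set P0 := "sponsored by".toList <:+: L with hP0
  set P1 := "brought to you".toList <:+: L with hP1
  set P2 := "word from our sponsor".toList <:+: L with hP2
  set P3 := "promo code".toList <:+: L with hP3
  set P4 := "use code".toList <:+: L with hP4
  set P5 := "discount code".toList <:+: L with hP5
  set P6 := "coupon".toList <:+: L with hP6
  set P7 := ".com".toList <:+: L with hP7
  set P8 := ".io".toList <:+: L with hP8
  set P9 := ".co/".toList <:+: L with hP9
  set P10 := "patreon".toList <:+: L with hP10
  set P11 := "substack".toList <:+: L with hP11
  set P12 := "ko-fi".toList <:+: L with hP12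
  set P13 := "buy me a coffee".toList <:+: L with hP13
  set P14 := "follow us".toList <:+: L with hP14
  set P15 := "subscribe".toList <:+: L with hP15
  set P16 := "twitter".toList <:+: L with hP16
  set P17 := "instagram".toList <:+: L with hP17
  set P18 := "youtube".toList <:+: L with hP18
  set P19 := "i love".toList <:+: L with hP19
  set P20 := "i really like".toList <:+: L with hP20
  set P21 := "big fan of".toList <:+: L with hP21
  set P22 := "shoutout".toList <:+: L with hP22
  set P23 := "not sponsored".toList <:+: L with hP23
  split_ifs with c0 c1 c2 c3 c4 c5
  · have e : m = 0 := h0.mpr c0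
    rw [e]; rfl
  · have ha : m ≤ 1 := h1.mpr (Or.inr (Or.inr (Or.inr (c1))))
    have hb : m ≠ 0 := by
      intro e
      rcases h0.mp e with x|x|x
      · exact c0 (Or.inl x)
      · exact c0 (Or.inr (Or.inl x))
      · exact c0 (Or.inr (Or.inr (x)))
    have e : m = 1 := by omega
    rw [e]; rfl
  · have ha : m ≤ 2 := by
      rcases c2 with (x | x) | x
      · exact h2.mpr (Or.inr (Or.inr (Or.inr (Or.inr (Or.inr (Or.inr (Or.inr (Or.inl x))))))))
      · exact h2.mpr (Or.inr (Or.inr (Or.inr (Or.inr (Or.inr (Or.inr (Or.inr (Or.inr (Or.inl x)))))))))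
      · exact h2.mpr (Or.inr (Or.inr (Or.inr (Or.inr (Or.inr (Or.inr (Or.inr (Or.inr (Or.inr (x))))))))))
    have hb : ¬ m ≤ 1 := by
      intro e
      rcases h1.mp e with x|x|x|x|x|x|x
      · exact c0 (Or.inl x)
      · exact c0 (Or.inr (Or.inl x))
      · exact c0 (Or.inr (Or.inr (x)))
      · exact c1 (Or.inl x)
      · exact c1 (Or.inr (Or.inl x))
      · exact c1 (Or.inr (Or.inr (Or.inl x)))
      · exact c1 (Or.inr (Or.inr (Or.inr (x))))
    have e : m = 2 := by omega
    rw [e]; rfl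
  · have ha : m ≤ 3 := h3.mpr (Or.inr (Or.inr (Or.inr (Or.inr (Or.inr (Or.inr (Or.inr (Or.inr (Or.inr (Or.inr (c3)))))))))))
    have hb : ¬ m ≤ 2 := by
      intro e
      rcases h2.mp e with x|x|x|x|x|x|x|x|x|x
      · exact c0 (Or.inl x)
      · exact c0 (Or.inr (Or.inl x))
      · exact c0 (Or.inr (Or.inr (x)))
      · exact c1 (Or.inl x)
      · exact c1 (Or.inr (Or.inl x))
      · exact c1 (Or.inr (Or.inr (Or.inl x)))
      · exact c1 (Or.inr (Or.inr (Or.inr (x))))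
      · exact c2 (Or.inl (Or.inl x))
      · exact c2 (Or.inl (Or.inr x))
      · exact c2 (Or.inr x)
    have e : m = 3 := by omega
    rw [e]; rfl
  · have ha : m ≤ 4 := h4.mpr (Or.inr (Or.inr (Or.inr (Or.inr (Or.inr (Or.inr (Or.inr (Or.inr (Or.inr (Or.inr (Or.inr (Or.inr (Or.inr (Or.inr (c4)))))))))))))))
    have hb : ¬ m ≤ 3 := by
      intro e
      rcases h3.mp e with x|x|x|x|x|x|x|x|x|x|x|x|x|x
      · exact c0 (Or.inl x)
      · exact c0 (Or.inr (Or.inl x))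
      · exact c0 (Or.inr (Or.inr (x)))
      · exact c1 (Or.inl x)
      · exact c1 (Or.inr (Or.inl x))
      · exact c1 (Or.inr (Or.inr (Or.inl x)))
      · exact c1 (Or.inr (Or.inr (Or.inr (x))))
      · exact c2 (Or.inl (Or.inl x))
      · exact c2 (Or.inl (Or.inr x))
      · exact c2 (Or.inr x)
      · exact c3 (Or.inl x)
      · exact c3 (Or.inr (Or.inl x))
      · exact c3 (Or.inr (Or.inr (Or.inl x)))
      · exact c3 (Or.inr (Or.inr (Or.inr (x))))
    have e : m = 4 := by omega
    rw [e]; rfl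
  · have ha : m ≤ 5 := h5.mpr (Or.inr (Or.inr (Or.inr (Or.inr (Or.inr (Or.inr (Or.inr (Or.inr (Or.inr (Or.inr (Or.inr (Or.inr (Or.inr (Or.inr (Or.inr (Or.inr (Or.inr (Or.inr (Or.inr (c5))))))))))))))))))))
    have hb : ¬ m ≤ 4 := by
      intro e
      rcases h4.mp e with x|x|x|x|x|x|x|x|x|x|x|x|x|x|x|x|x|x|x
      · exact c0 (Or.inl x)
      · exact c0 (Or.inr (Or.inl x))
      · exact c0 (Or.inr (Or.inr (x)))
      · exact c1 (Or.inl x)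
      · exact c1 (Or.inr (Or.inl x))
      · exact c1 (Or.inr (Or.inr (Or.inl x)))
      · exact c1 (Or.inr (Or.inr (Or.inr (x))))
      · exact c2 (Or.inl (Or.inl x))
      · exact c2 (Or.inl (Or.inr x))
      · exact c2 (Or.inr x)
      · exact c3 (Or.inl x)
      · exact c3 (Or.inr (Or.inl x))
      · exact c3 (Or.inr (Or.inr (Or.inl x)))
      · exact c3 (Or.inr (Or.inr (Or.inr (x))))
      · exact c4 (Or.inl x)
      · exact c4 (Or.inr (Or.inl x))
      · exact c4 (Or.inr (Or.inr (Or.inl x)))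
      · exact c4 (Or.inr (Or.inr (Or.inr (Or.inl x))))
      · exact c4 (Or.inr (Or.inr (Or.inr (Or.inr (x)))))
    have e : m = 5 := by omega
    rw [e]; rfl
  · have hb : ¬ m ≤ 5 := by
      intro e
      rcases h5.mp e with x|x|x|x|x|x|x|x|x|x|x|x|x|x|x|x|x|x|x|x|x|x|x|x
      · exact c0 (Or.inl x)
      · exact c0 (Or.inr (Or.inl x))
      · exact c0 (Or.inr (Or.inr (x)))
      · exact c1 (Or.inl x)
      · exact c1 (Or.inr (Or.inl x))
      · exact c1 (Or.inr (Or.inr (Or.inl x)))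
      · exact c1 (Or.inr (Or.inr (Or.inr (x))))
      · exact c2 (Or.inl (Or.inl x))
      · exact c2 (Or.inl (Or.inr x))
      · exact c2 (Or.inr x)
      · exact c3 (Or.inl x)
      · exact c3 (Or.inr (Or.inl x))
      · exact c3 (Or.inr (Or.inr (Or.inl x)))
      · exact c3 (Or.inr (Or.inr (Or.inr (x))))
      · exact c4 (Or.inl x)
      · exact c4 (Or.inr (Or.inl x))
      · exact c4 (Or.inr (Or.inr (Or.inl x)))
      · exact c4 (Or.inr (Or.inr (Or.inr (Or.inl x))))
      · exact c4 (Or.inr (Or.inr (Or.inr (Or.inr (x)))))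
      · exact c5 (Or.inl x)
      · exact c5 (Or.inr (Or.inl x))
      · exact c5 (Or.inr (Or.inr (Or.inl x)))
      · exact c5 (Or.inr (Or.inr (Or.inr (Or.inl x))))
      · exact c5 (Or.inr (Or.inr (Or.inr (Or.inr (x)))))
    have e : m = 6 := by omega
    rw [e]; rfl
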